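-- pv_equiv track=rewrite | github.com/trietnguyenminh1502-nmt/Artificial-Intelligence-AI- | QuanXe_Simute_Beam.py | dls_n_rooks_all
-- ===== SOURCE A (Python) =====
-- def dls_n_rooks_all(n=8, depth_limit=8):
--     stack = [([], 0)]
--     while stack:
--         state, depth = stack.pop()
--         if len(state) == n:
--             yield state
--         elif depth < depth_limit:
--             for col in range(n-1, -1, -1):
--                 if col not in state:
--                     stack.append((state + [col], depth + 1))
-- ===== SOURCE B (Python) =====
-- def dls_n_rooks_all(n=8, depth_limit=8):
--     # Recursive DFS generator instead of A's explicit LIFO stack loop.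
--     def rec(state, depth):
--         if len(state) == n:
--             yield state
--         elif depth < depth_limit:
--             for col in range(n):
--                 if col not in state:
--                     yield from rec(state + [col], depth + 1)
--     yield from rec([], 0)
-- ===== Notes on version B (the rewrite author's own statement) =====
-- stated objective: simpler
-- what changed: Replaced the explicit LIFO-stack worklist loop with a direct recursive DFS generator over ascending columns (A's descending pushes plus LIFO pops reduce to the same ascending preorder).
import Mathlib
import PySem

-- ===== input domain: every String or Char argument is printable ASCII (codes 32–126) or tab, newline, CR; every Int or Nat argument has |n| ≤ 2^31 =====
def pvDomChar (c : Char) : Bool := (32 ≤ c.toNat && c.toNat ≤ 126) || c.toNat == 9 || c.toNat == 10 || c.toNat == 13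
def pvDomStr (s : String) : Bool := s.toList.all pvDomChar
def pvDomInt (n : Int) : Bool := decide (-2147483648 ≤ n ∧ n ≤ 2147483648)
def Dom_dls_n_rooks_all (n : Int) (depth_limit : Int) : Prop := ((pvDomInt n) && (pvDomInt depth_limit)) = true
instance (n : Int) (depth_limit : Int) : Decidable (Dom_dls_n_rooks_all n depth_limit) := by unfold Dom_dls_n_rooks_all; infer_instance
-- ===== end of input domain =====

-- B replaces A's explicit LIFO-stack worklist loop by a direct recursive DFS over
-- ascending columns (same enumeration, simpler decomposition); equal output proved below.

-- ===== PORT A =====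
-- Measure machinery used only to justify termination of A's while-loop (cited by
-- decreasing_by); all its proofs are small hand-written terms.
def dlsW (n L d : Int) : Nat := (n.toNat + 1) ^ ((L - d).toNat + 1) + 1

def dlsMu (n L : Int) (stack : List (List Int × Int)) : Nat :=
  (stack.map (fun p => dlsW n L p.2)).sum

-- the inner 'for col in range(n-1,-1,-1): if col not in state: stack.append(...)'
def dlsPushA (n : Int) (state : List Int) (depth : Int)
    (stack : List (List Int × Int)) : List (List Int × Int) :=
  (PySem.List.pyRange (n-1) (-1) (-1)).foldl
    (fun st col => if !(state.contains col) then (state ++ [col], depth + 1) :: st else st)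
    stack

theorem dlsW_pos (n L d : Int) : 0 < dlsW n L d :=
  Nat.succ_pos _

theorem dlsMu_cons (n L : Int) (state : List Int) (depth : Int)
    (rest : List (List Int × Int)) :
    dlsMu n L ((state, depth) :: rest) = dlsW n L depth + dlsMu n L rest := rfl

theorem dlsMu_tail_lt (n L : Int) (state : List Int) (depth : Int)
    (rest : List (List Int × Int)) :
    dlsMu n L rest < dlsMu n L ((state, depth) :: rest) := by
  rw [dlsMu_cons]
  exact Nat.lt_add_of_pos_left (dlsW_pos n L depth)

theorem dls_toNat_pred (L d : Int) : (L - (d + 1)).toNat = (L - d).toNat - 1 := by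
  rw [sub_add_eq_sub_sub, Int.pred_toNat]

theorem dls_toNat_pos (L d : Int) (hd : d < L) : 1 ≤ (L - d).toNat :=
  Int.lt_toNat.mpr (by exact_mod_cast sub_pos.mpr hd)

theorem dlsMu_foldl_le (n L : Int) (state : List Int) (depth : Int) :
    ∀ (l : List Int) (st : List (List Int × Int)),
      dlsMu n L (l.foldl
          (fun st col => if !(state.contains col) then (state ++ [col], depth + 1) :: st else st) st)
        ≤ l.length * dlsW n L (depth + 1) + dlsMu n L st := by
  intro l
  induction l with
  | nil =>
    intro st
    rw [List.foldl_nil, List.length_nil, Nat.zero_mul, Nat.zero_add]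
  | cons a l ih =>
    intro st
    rw [List.foldl_cons, List.length_cons]
    refine le_trans (ih _) ?_
    have hstep : dlsMu n L (if !(state.contains a) then (state ++ [a], depth + 1) :: st else st)
        ≤ dlsW n L (depth + 1) + dlsMu n L st := by
      by_cases h : (!(state.contains a)) = true
      · rw [if_pos h, dlsMu_cons]
      · rw [if_neg h]
        exact Nat.le_add_left _ _
    rw [Nat.succ_mul, Nat.add_assoc]
    exact Nat.add_le_add_left hstep _

-- the arithmetic heart of A's termination
theorem dls_key (n L d : Int) (hd : d < L) (len : Nat) (hlen : len ≤ n.toNat) :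
    len * dlsW n L (d + 1) < dlsW n L d := by
  unfold dlsW
  rw [dls_toNat_pred L d, Nat.sub_add_cancel (dls_toNat_pos L d hd)]
  set n1 := n.toNat + 1 with hn1
  set e := (L - d).toNat with he
  set K := n1 ^ e with hK
  have hnK : n1 ≤ K := by
    calc n1 = n1 ^ 1 := (pow_one n1).symm
    _ ≤ n1 ^ e := Nat.pow_le_pow_right (Nat.le_add_left 1 n.toNat) (dls_toNat_pos L d hd)
  have hpow : n1 ^ (e + 1) = K * n1 := pow_succ n1 e
  rw [hpow]
  have hlen' : len + 1 ≤ n1 := Nat.add_le_add_right hlen 1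
  have h1 : (len + 1) * (K + 1) ≤ n1 * (K + 1) := Nat.mul_le_mul_right _ hlen'
  have h2 : (len + 1) * (K + 1) = len * (K + 1) + (K + 1) := Nat.succ_mul len (K + 1)
  have h3 : n1 * (K + 1) = K * n1 + n1 := by
    rw [Nat.mul_add, Nat.mul_one, Nat.mul_comm]
  have h4 : len * (K + 1) + (K + 1) ≤ K * n1 + n1 := by
    rw [← h2, ← h3]
    exact h1
  have h5 : len * (K + 1) + (K + 1) ≤ K * n1 + K := le_trans h4 (Nat.add_le_add_left hnK _)
  have h6 : len * (K + 1) + (K + 1) = (len * (K + 1) + 1) + K := by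
    rw [Nat.add_comm K 1, ← Nat.add_assoc]
  have h7 : len * (K + 1) + 1 ≤ K * n1 := Nat.le_of_add_le_add_right (h6 ▸ h5)
  exact Nat.lt_succ_of_le (Nat.le_of_succ_le h7)

theorem dlsMu_push_lt (n L : Int) (state : List Int) (depth : Int)
    (rest : List (List Int × Int)) (hd : depth < L) :
    dlsMu n L (dlsPushA n state depth rest) < dlsMu n L ((state, depth) :: rest) := by
  have hlen : (PySem.List.pyRange (n-1) (-1) (-1)).length = n.toNat := by
    rw [PySem.List.length_pyRange_neg_one]
    have h : (n : Int) - 1 - (-1) = n := by ring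
    rw [h]
  have hb := dlsMu_foldl_le n L state depth (PySem.List.pyRange (n-1) (-1) (-1)) rest
  rw [hlen] at hb
  rw [dlsMu_cons]
  exact lt_of_le_of_lt hb
    (Nat.add_lt_add_right (dls_key n L depth hd n.toNat (Nat.le_refl _)) _)

-- the while-loop of A: pop, test, push children (LIFO: head is the top of the stack)
def dlsLoopA (n L : Int) : List (List Int × Int) → List (List Int)
  | [] => []
  | (state, depth) :: rest =>
    if (state.length : Int) = n then state :: dlsLoopA n L rest
    else if depth < L then dlsLoopA n L (dlsPushA n state depth rest)
    else dlsLoopA n L rest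
termination_by stack => dlsMu n L stack
decreasing_by
  · exact dlsMu_tail_lt n L state depth rest
  · exact dlsMu_push_lt n L state depth rest (by assumption)
  · exact dlsMu_tail_lt n L state depth rest

def dls_n_rooks_all (n : Int) (depth_limit : Int) : List (List Int) :=
  dlsLoopA n depth_limit [([], 0)]

-- ===== PORT B =====
-- rec(state, depth): yield state if complete, else recurse on each unused column ascending
theorem dls_depth_dec (L depth : Int) (h : depth < L) :
    (L - (depth + 1)).toNat < (L - depth).toNat := by
  rw [dls_toNat_pred]
  exact Nat.sub_lt (dls_toNat_pos L depth h) Nat.one_pos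

def dlsRecB (n L : Int) (state : List Int) (depth : Int) : List (List Int) :=
  if (state.length : Int) = n then [state]
  else if depth < L then
    ((PySem.List.pyRange 0 n 1).filter (fun c => !(state.contains c))).attach.flatMap
      (fun c => dlsRecB n L (state ++ [c.1]) (depth + 1))
  else []
termination_by (L - depth).toNat
decreasing_by exact dls_depth_dec L depth (by assumption)

def dls_n_rooks_all_alt (n : Int) (depth_limit : Int) : List (List Int) :=
  dlsRecB n depth_limit [] 0

-- ===== PRECONDITION & SPEC =====
def Spec_dls_n_rooks_all (n : Int) (depth_limit : Int) (out : List (List Int)) : Prop := out = dls_n_rooks_all_alt n depth_limit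
instance (n : Int) (depth_limit : Int) (out : List (List Int)) : Decidable (Spec_dls_n_rooks_all n depth_limit out) := by unfold Spec_dls_n_rooks_all; infer_instance

-- ===== CLAIM (what is proved, stated in full; the proofs are below) =====
def Claim_equal_dls_n_rooks_all : Prop := ∀ (n : Int) (depth_limit : Int), Dom_dls_n_rooks_all n depth_limit → Spec_dls_n_rooks_all n depth_limit (dls_n_rooks_all n depth_limit)

-- ===== LEMMAS AND PROOFS =====
-- foldl-push = reversed-filtered children consed in front
theorem dlsPushA_eq (n : Int) (state : List Int) (depth : Int)
    (stack : List (List Int × Int)) :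
    dlsPushA n state depth stack =
      (((PySem.List.pyRange 0 n 1).filter (fun c => !(state.contains c))).map
        (fun c => (state ++ [c], depth + 1))) ++ stack := by
  have gen : ∀ (l : List Int) (st : List (List Int × Int)),
      l.foldl (fun st col => if !(state.contains col) then (state ++ [col], depth + 1) :: st else st) st
        = ((l.filter (fun c => !(state.contains c))).reverse.map (fun c => (state ++ [c], depth + 1))) ++ st := by
    intro l
    induction l with
    | nil => intro st; simp
    | cons a l ih =>
      intro st
      by_cases h : (!state.contains a) = true
      · simp only [List.foldl_cons, List.filter_cons]
        rw [if_pos h, if_pos h, ih]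
        simp
      · simp only [List.foldl_cons, List.filter_cons]
        rw [if_neg h, if_neg h, ih]
  have hrev : (PySem.List.pyRange (n-1) (-1) (-1)) = (PySem.List.pyRange 0 n 1).reverse := by
    have h0 := PySem.List.pyRange_neg_one_eq_reverse (n-1) (-1)
    norm_num at h0
    exact h0
  rw [dlsPushA, gen, hrev, List.filter_reverse, List.reverse_reverse]

theorem attach_flatMap_eq {α β : Type} (l : List α) (f : α → List β) :
    l.attach.flatMap (fun c => f c.1) = l.flatMap f := by
  conv_rhs => rw [← List.attach_map_subtype_val l]
  rw [List.flatMap_map]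

theorem dlsLoopA_eq_flatMap (n L : Int) :
    ∀ (m : Nat) (stack : List (List Int × Int)), dlsMu n L stack ≤ m →
      dlsLoopA n L stack = stack.flatMap (fun p => dlsRecB n L p.1 p.2) := by
  intro m
  induction m with
  | zero =>
    intro stack h
    cases stack with
    | nil => simp [dlsLoopA]
    | cons p rest =>
      exfalso
      have := dlsW_pos n L p.2
      simp [dlsMu] at h
      omega
  | succ m ih =>
    intro stack h
    cases stack with
    | nil => simp [dlsLoopA]
    | cons p rest =>
      obtain ⟨state, depth⟩ := p
      have hw := dlsW_pos n L depth
      have hrest : dlsMu n L rest ≤ m := by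
        simp [dlsMu] at h ⊢; omega
      by_cases h1 : (state.length : Int) = n
      · rw [dlsLoopA, if_pos h1, ih rest hrest]
        simp only [List.flatMap_cons]
        have hb : dlsRecB n L state depth = [state] := by
          unfold dlsRecB; rw [if_pos h1]
        rw [hb]
        simp
      · by_cases h2 : depth < L
        · have hpush : dlsMu n L (dlsPushA n state depth rest) ≤ m := by
            have := dlsMu_push_lt n L state depth rest h2
            simp [dlsMu] at this h ⊢
            omega
          rw [dlsLoopA, if_neg h1, if_pos h2, ih _ hpush, dlsPushA_eq,
            List.flatMap_append, List.flatMap_map]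
          simp only [List.flatMap_cons]
          have hb : dlsRecB n L state depth =
              ((PySem.List.pyRange 0 n 1).filter (fun c => !(state.contains c))).attach.flatMap
                (fun c => dlsRecB n L (state ++ [c.1]) (depth + 1)) := by
            conv_lhs => rw [dlsRecB.eq_def]
            rw [if_neg h1, if_pos h2]
          rw [hb, attach_flatMap_eq ((PySem.List.pyRange 0 n 1).filter (fun c => !(state.contains c)))
            (fun a => dlsRecB n L (state ++ [a]) (depth + 1))]
        · rw [dlsLoopA, if_neg h1, if_neg h2, ih rest hrest]
          simp only [List.flatMap_cons]
          have hb : dlsRecB n L state depth = [] := by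
            unfold dlsRecB; rw [if_neg h1, if_neg h2]
          rw [hb]
          simp

-- ===== VERDICT (by name: the statement is the Claim_ definition above) =====
theorem dls_n_rooks_all_spec : Claim_equal_dls_n_rooks_all := by
  intro n L _
  unfold Spec_dls_n_rooks_all dls_n_rooks_all dls_n_rooks_all_alt
  rw [dlsLoopA_eq_flatMap n L (dlsMu n L [([], 0)]) _ le_rfl]
  simp
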